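-- pv_equiv track=rewrite | github.com/arnaualbert/python | ej_sol/2022-04-28-code/14-dictionaries/e06.py | e06_v5
-- ===== SOURCE A (Python) =====
-- def e06_v5(data: dict, del_keys: list[str]) -> dict:
--     '''Exercise 6: Delete a list of keys from a dictionary.'''
--
--     all_keys:     set[str] = set(data.keys())
--     denied_keys:  set[str] = set(del_keys)
--     allowed_keys: set[str] = all_keys - denied_keys
--     result:       dict     = { key: value
--                                for key, value in data.items()
--                                if key in allowed_keys }
--
--     return result
-- ===== SOURCE B (Python) =====
-- def e06_v5(data: dict, del_keys: list[str]) -> dict: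
--     '''Exercise 6: Delete a list of keys from a dictionary.'''
--     result = dict(data)
--     for key in del_keys:
--         result.pop(key, None)
--     return result
-- ===== Notes on version B (the rewrite author's own statement) =====
-- stated objective: simpler
-- what changed: B copies the dict and deletes each denied key in place with result.pop(key, None), instead of building the set difference of keys and rebuilding the dict by filtering data.items() on membership.
import Mathlib
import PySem

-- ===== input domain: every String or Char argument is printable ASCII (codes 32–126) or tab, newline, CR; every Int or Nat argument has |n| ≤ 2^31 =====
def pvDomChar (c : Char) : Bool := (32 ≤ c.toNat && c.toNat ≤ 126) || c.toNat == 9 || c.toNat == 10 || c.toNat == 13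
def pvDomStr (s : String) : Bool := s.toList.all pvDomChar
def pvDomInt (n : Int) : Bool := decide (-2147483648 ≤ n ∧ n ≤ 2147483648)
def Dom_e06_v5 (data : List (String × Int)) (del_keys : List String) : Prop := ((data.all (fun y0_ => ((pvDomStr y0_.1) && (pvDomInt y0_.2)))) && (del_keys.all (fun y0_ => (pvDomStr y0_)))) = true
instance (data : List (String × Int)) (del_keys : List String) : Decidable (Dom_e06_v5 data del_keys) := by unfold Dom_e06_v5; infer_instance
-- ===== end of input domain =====

-- B deletes each denied key from a copy of the dict with pop(key, None) instead of
-- building a set difference of keys and filtering data.items() by membership (simpler).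

-- ===== PORT A =====
def e06_v5 (data : List (String × Int)) (del_keys : List String) : List (String × Int) :=
  let all_keys : PySem.Set String := PySem.Set.ofList (data.map (·.1))
  let denied_keys : PySem.Set String := PySem.Set.ofList del_keys
  let allowed_keys : PySem.Set String := PySem.Set.diff all_keys denied_keys
  -- dict comprehension over data.items(), keeping keys in allowed_keys
  data.filter (fun kv => PySem.Set.contains allowed_keys kv.1)

-- ===== PORT B =====
def e06_v5_alt (data : List (String × Int)) (del_keys : List String) : List (String × Int) :=
  -- result = dict(data); for key in del_keys: result.pop(key, None); return result
  (del_keys.foldl (fun d k => PySem.Dict.erase d k) (PySem.Dict.mk data)).items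

-- ===== PRECONDITION & SPEC =====
def Spec_e06_v5 (data : List (String × Int)) (del_keys : List String) (out : List (String × Int)) : Prop := out = e06_v5_alt data del_keys
instance (data : List (String × Int)) (del_keys : List String) (out : List (String × Int)) : Decidable (Spec_e06_v5 data del_keys out) := by unfold Spec_e06_v5; infer_instance

-- ===== CLAIM (what is proved, stated in full; the proofs are below) =====
def Claim_equal_e06_v5 : Prop := ∀ (data : List (String × Int)) (del_keys : List String), Dom_e06_v5 data del_keys → Spec_e06_v5 data del_keys (e06_v5 data del_keys)

-- ===== LEMMAS AND PROOFS =====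

-- erasing every key of ks from a dict filters its items by non-membership of the key in ks
theorem foldl_erase_items (ks : List String) (d : PySem.Dict String Int) :
    (ks.foldl (fun d k => PySem.Dict.erase d k) d).items
      = d.items.filter (fun p => !decide (p.1 ∈ ks)) := by
  induction ks generalizing d with
  | nil => simp
  | cons k ks ih =>
    rw [List.foldl_cons, ih, PySem.Dict.erase]
    simp only [List.filter_filter]
    apply List.filter_congr
    intro p _
    simp only [List.mem_cons]
    by_cases h1 : p.1 = k <;> by_cases h2 : p.1 ∈ ks <;> simp [h1, h2]

-- ===== VERDICT (by name: the statement is the Claim_ definition above) =====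
theorem e06_v5_spec : Claim_equal_e06_v5 := by
  intro data del_keys _
  unfold Spec_e06_v5 e06_v5 e06_v5_alt
  rw [foldl_erase_items]
  apply List.filter_congr
  intro kv hkv
  rw [Bool.eq_iff_iff]
  constructor
  · intro h
    have := (PySem.Set.contains_iff _ _).mp h
    rw [PySem.Set.mem_diff] at this
    simp [PySem.Set.mem_ofList] at this
    simp [this.2]
  · intro h
    apply (PySem.Set.contains_iff _ _).mpr
    rw [PySem.Set.mem_diff]
    refine ⟨?_, ?_⟩
    · rw [PySem.Set.mem_ofList]
      exact List.mem_map.mpr ⟨kv, hkv, rfl⟩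
    · rw [PySem.Set.mem_ofList]
      simpa using h
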